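-- pv_equiv track=rewrite | github.com/Donkey-1028/algorithms | alghorithms-of-everyone/fake_coin.py | find_fake_coin
-- ===== SOURCE A (Python) =====
-- def fake_coin(a, b, c, d):
--     """
--     a 에서 b 까지에 놓인 동전과 c 에서 d 까지에 놓인 동전의 무게를 비교
--     a 에서 b 까지에 가짜 동전이 있으면 -1
--     c 에서 d 까지에 가짜 동전이 있으면 1
--     가짜 동전이 없으면 0
--     """
--     fake = 50
--     if a <= fake and fake <= b:
--         return -1
--     if c <= fake and fake <= d:
--         return 1
--     return 0
--
-- def find_fake_coin(start, end):
--     if start == end: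
--         return start
--
--     center = (start + end) // 2
--     fc1_left = start
--     fc1_right = center
--     fc2_left = center + 1
--     fc2_right = end
--
--     check = fake_coin(fc1_left, fc1_right, fc2_left, fc2_right)
--
--     if check == -1:
--         return find_fake_coin(fc1_left, fc1_right)
--     elif check == 1:
--         return find_fake_coin(fc2_left, fc2_right)
-- ===== SOURCE B (Python) =====
-- def find_fake_coin(start, end):
--     # Closed form: the fake coin is at fixed position 50, so the binary
--     # search converges to 50 whenever 50 lies in [start, end]; a
--     # single-element interval returns its element, anything else None.
--     if start == end:
--         return start
--     if start <= 50 <= end: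
--         return 50
--     return None
-- ===== Notes on version B (the rewrite author's own statement) =====
-- stated objective: faster
-- what changed: Replaced the recursive binary search over the interval by a closed-form answer: since the fake coin sits at the fixed position 50, return start when start==end, 50 when start<=50<=end, else None.
import Mathlib
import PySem

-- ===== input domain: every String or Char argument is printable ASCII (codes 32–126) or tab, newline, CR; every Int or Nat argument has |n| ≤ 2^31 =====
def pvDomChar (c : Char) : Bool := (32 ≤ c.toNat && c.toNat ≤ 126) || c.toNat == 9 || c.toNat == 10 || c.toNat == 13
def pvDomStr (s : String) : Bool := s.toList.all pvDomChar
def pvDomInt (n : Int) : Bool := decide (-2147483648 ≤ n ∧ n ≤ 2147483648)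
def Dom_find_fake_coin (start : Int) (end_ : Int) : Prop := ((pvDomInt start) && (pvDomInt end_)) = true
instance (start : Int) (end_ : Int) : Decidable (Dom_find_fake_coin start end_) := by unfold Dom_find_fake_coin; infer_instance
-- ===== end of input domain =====

-- B replaces A's recursive binary search by the closed form it converges to (fake coin fixed at 50): O(1) instead of O(log(end-start)).


-- ===== PORT A =====
def fake_coin (a : Int) (b : Int) (c : Int) (d : Int) : Int :=
  -- fake = 50
  if a ≤ 50 ∧ 50 ≤ b then -1
  else if c ≤ 50 ∧ 50 ≤ d then 1
  else 0

-- `fake_coin … = -1` forces the fake position into the left half (used by the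
-- port's own termination argument, hence stated above the port).
theorem fake_coin_eq_neg_one {a b c d : Int} (h : fake_coin a b c d = -1) :
    a ≤ 50 ∧ 50 ≤ b := by
  unfold fake_coin at h; split_ifs at h with h1 h2 <;> simp_all <;> omega

-- `fake_coin … = 1` forces it into the right half (also cited by `decreasing_by`).
theorem fake_coin_eq_one {a b c d : Int} (h : fake_coin a b c d = 1) :
    ¬(a ≤ 50 ∧ 50 ≤ b) ∧ (c ≤ 50 ∧ 50 ≤ d) := by
  unfold fake_coin at h; split_ifs at h with h1 h2 <;> simp_all <;> omega

-- floor-division midpoint bracket, cited by the port's `decreasing_by`.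
theorem pv_fdiv2_bracket (x : Int) :
    2 * PySem.Int.floordiv x 2 ≤ x ∧ x < 2 * PySem.Int.floordiv x 2 + 2 := by
  have h := PySem.Int.floordiv_mul_add_mod x 2
  have h1 := PySem.Int.mod_nonneg x (b := 2) (by omega)
  have h2 := PySem.Int.mod_lt x (b := 2) (by omega)
  omega

def find_fake_coin (start : Int) (end_ : Int) : Option Int :=
  if start = end_ then some start
  else
    let center := PySem.Int.floordiv (start + end_) 2
    let fc1_left := start
    let fc1_right := center
    let fc2_left := center + 1
    let fc2_right := end_
    let check := fake_coin fc1_left fc1_right fc2_left fc2_right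
    if h1 : check = -1 then find_fake_coin fc1_left fc1_right
    else if h2 : check = 1 then find_fake_coin fc2_left fc2_right
    else none
termination_by (end_ - start).toNat
decreasing_by
  · have hb := pv_fdiv2_bracket (start + end_)
    have hc := fake_coin_eq_neg_one h1
    omega
  · have hb := pv_fdiv2_bracket (start + end_)
    have hc := fake_coin_eq_one h2
    omega

-- ===== PORT B =====
def find_fake_coin_alt (start : Int) (end_ : Int) : Option Int :=
  if start = end_ then some start
  else if start ≤ 50 ∧ 50 ≤ end_ then some 50
  else none

-- ===== PRECONDITION & SPEC =====
def Spec_find_fake_coin (start : Int) (end_ : Int) (out : Option Int) : Prop := out = find_fake_coin_alt start end_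
instance (start : Int) (end_ : Int) (out : Option Int) : Decidable (Spec_find_fake_coin start end_ out) := by unfold Spec_find_fake_coin; infer_instance

-- ===== CLAIM (what is proved, stated in full; the proofs are below) =====
def Claim_equal_find_fake_coin : Prop := ∀ (start : Int) (end_ : Int), Dom_find_fake_coin start end_ → Spec_find_fake_coin start end_ (find_fake_coin start end_)

-- ===== LEMMAS AND PROOFS =====

theorem fake_coin_eq_zero {a b c d : Int} (h1 : ¬(a ≤ 50 ∧ 50 ≤ b))
    (h2 : ¬(c ≤ 50 ∧ 50 ≤ d)) : fake_coin a b c d = 0 := by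
  unfold fake_coin; split_ifs <;> simp_all

theorem find_fake_coin_agrees (n : Nat) :
    ∀ (start end_ : Int), (end_ - start).toNat ≤ n →
      find_fake_coin start end_ = find_fake_coin_alt start end_ := by
  induction n with
  | zero =>
    intro start end_ hn
    by_cases heq : start = end_
    · unfold find_fake_coin find_fake_coin_alt
      simp [heq]
    · -- start > end_ here: the comparison reports 0, so A returns none
      have hgt : end_ < start := by omega
      have hb := pv_fdiv2_bracket (start + end_)
      unfold find_fake_coin
      rw [if_neg heq]
      rw [dif_neg, dif_neg]
      · unfold find_fake_coin_alt
        rw [if_neg heq, if_neg (by omega)]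
      · intro h; have := fake_coin_eq_one h; omega
      · intro h; have := fake_coin_eq_neg_one h; omega
  | succ n ih =>
    intro start end_ hn
    by_cases heq : start = end_
    · unfold find_fake_coin find_fake_coin_alt
      simp [heq]
    · have hb := pv_fdiv2_bracket (start + end_)
      set c := PySem.Int.floordiv (start + end_) 2 with hc
      by_cases hgt : end_ < start
      · unfold find_fake_coin
        rw [if_neg heq]
        rw [dif_neg, dif_neg]
        · unfold find_fake_coin_alt
          rw [if_neg heq, if_neg (by omega)]
        · intro h; have := fake_coin_eq_one h; omega
        · intro h; have := fake_coin_eq_neg_one h; omega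
      · -- start < end_
        have hlt : start < end_ := by omega
        have hcl : start ≤ c := by omega
        have hcr : c < end_ := by omega
        by_cases hin : start ≤ 50 ∧ 50 ≤ end_
        · by_cases hleft : 50 ≤ c
          · -- check = -1, recurse left; the left half still contains 50
            have hchk : fake_coin start c (c + 1) end_ = -1 := by
              unfold fake_coin; rw [if_pos ⟨hin.1, hleft⟩]
            unfold find_fake_coin
            rw [if_neg heq]
            simp only [← hc, hchk]
            rw [dif_pos trivial]
            rw [ih start c (by omega)]
            unfold find_fake_coin_alt
            rw [if_neg heq, if_pos hin]
            by_cases hsc : start = c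
            · rw [if_pos hsc]
              have : start = 50 := by omega
              simp [this]
            · rw [if_neg hsc, if_pos ⟨hin.1, hleft⟩]
          · -- check = 1, recurse right; the right half still contains 50
            have hchk : fake_coin start c (c + 1) end_ = 1 := by
              unfold fake_coin
              rw [if_neg (by omega), if_pos ⟨by omega, hin.2⟩]
            unfold find_fake_coin
            rw [if_neg heq]
            simp only [← hc, hchk]
            rw [dif_neg (by decide), dif_pos trivial]
            rw [ih (c + 1) end_ (by omega)]
            unfold find_fake_coin_alt
            rw [if_neg heq, if_pos hin]
            by_cases hsc : c + 1 = end_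
            · rw [if_pos hsc]
              have : end_ = 50 := by omega
              simp [this, hsc]
            · rw [if_neg hsc, if_pos ⟨by omega, hin.2⟩]
        · -- 50 outside [start, end_]: check = 0, both return none
          have hchk : fake_coin start c (c + 1) end_ = 0 :=
            fake_coin_eq_zero (by omega) (by omega)
          unfold find_fake_coin
          rw [if_neg heq]
          simp only [← hc, hchk]
          rw [dif_neg (by decide), dif_neg (by decide)]
          unfold find_fake_coin_alt
          rw [if_neg heq, if_neg hin]

-- ===== VERDICT (by name: the statement is the Claim_ definition above) =====
theorem find_fake_coin_spec : Claim_equal_find_fake_coin := by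
  intro start end_ _
  unfold Spec_find_fake_coin
  exact find_fake_coin_agrees (end_ - start).toNat start end_ le_rfl
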